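-- pv_equiv track=rewrite | github.com/pypi-data/pypi-mirror-353 | packages/pyqsync/pyqsync-0.0.6-py3-none-any.whl/pyqsync/dubs.py | filter_by_md5sum
-- ===== SOURCE A (Python) =====
-- def filter_by_md5sum(files: dict) -> dict:
--     counter = {}
--     for key, value in files.items():
--         if "md5sum" in value["md5sum"]:
--             continue  # SOME ISSUE THAT SHOULD BE INVESTIGATED
--
--         if counter.get(value["md5sum"]):
--             value["path"] = key
--             counter[value["md5sum"]].append(value)
--         else:
--             value["path"] = key
--             counter[value["md5sum"]] = [value]
--
--     dubs = {}
--     for key, value in counter.items():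
--         if len(value) > 1:
--             dubs[key] = value
--
--     return dubs
-- ===== SOURCE B (Python) =====
-- def filter_by_md5sum(files: dict) -> dict:
--     # collect survivors, tagging each with its path (same in-place mutation as A performs)
--     survivors = []
--     for key, value in files.items():
--         m = value["md5sum"]
--         if "md5sum" not in m:
--             value["path"] = key
--             survivors.append((m, value))
--
--     # group by repeated partition on the first survivor's md5sum: peel off one group per
--     # round, keeping first-occurrence order of keys and within-group order; no dict of
--     # buckets is ever built, singletons are dropped on the spot
--     out = []
--     pending = survivors
--     while pending:
--         (m, v), rest = pending[0], pending[1:]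
--         same = [w for (k, w) in rest if k == m]
--         if same:
--             out.append((m, [v] + same))
--         pending = [(k, w) for (k, w) in rest if k != m]
--     return dict(out)
-- ===== Notes on version B (the rewrite author's own statement) =====
-- stated objective: alternative
-- what changed: B replaces A's hash-bucket grouping dict and bucket-length filter with a repeated-partition loop: it peels off the first survivor's whole md5sum group per round (dropping singletons immediately), so no dict of buckets exists; the trade is O(g*n) partitioning for g distinct md5sums instead of A's O(n) hashing.
import Mathlib
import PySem

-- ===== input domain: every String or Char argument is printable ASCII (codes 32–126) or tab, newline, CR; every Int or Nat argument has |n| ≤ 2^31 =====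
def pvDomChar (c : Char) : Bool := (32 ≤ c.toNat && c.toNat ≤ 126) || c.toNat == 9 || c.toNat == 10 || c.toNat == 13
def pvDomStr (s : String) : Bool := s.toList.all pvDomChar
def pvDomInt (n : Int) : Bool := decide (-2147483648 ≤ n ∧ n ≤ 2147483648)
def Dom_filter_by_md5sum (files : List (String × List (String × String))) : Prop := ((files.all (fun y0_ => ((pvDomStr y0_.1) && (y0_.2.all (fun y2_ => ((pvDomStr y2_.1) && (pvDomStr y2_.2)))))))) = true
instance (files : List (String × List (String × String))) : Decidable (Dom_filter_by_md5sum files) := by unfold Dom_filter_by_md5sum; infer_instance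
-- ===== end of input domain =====

-- B replaces A's dict-of-buckets grouping + bucket-length filter with a repeated-partition loop that
-- peels off one whole md5sum group per round (alternative algorithm, O(g*n) vs O(n)). Equivalence is
-- about the RETURN value: both Pythons also mutate the caller's value dicts (value["path"]=key), identically.


-- ===== PORT A =====
def filter_by_md5sum (files : List (String × List (String × String))) : List (String × List (List (String × String))) :=
  -- counter = {}; for key, value in files.items(): ...
  let counter : PySem.Dict String (List (PySem.Dict String String)) :=
    files.foldl (fun counter kv =>
      let value : PySem.Dict String String := PySem.Dict.mk kv.2
      match value.get? "md5sum" with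
      | none => counter  -- value["md5sum"] would raise KeyError: such inputs are outside Pre_
      | some m =>
        if PySem.Str.isIn "md5sum" m then counter  -- if "md5sum" in value["md5sum"]: continue
        else
          -- counter.get(...) is truthy iff the key exists (the buckets are never-empty lists)
          match counter.get? m with
          | some l => counter.insert m (l ++ [value.insert "path" kv.1])
          | none   => counter.insert m [value.insert "path" kv.1]) PySem.Dict.empty
  -- dubs = {}; for key, value in counter.items(): if len(value) > 1: dubs[key] = value
  let dubs : PySem.Dict String (List (PySem.Dict String String)) :=
    counter.items.foldl (fun dubs p => if p.2.length > 1 then dubs.insert p.1 p.2 else dubs)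
      PySem.Dict.empty
  dubs.items.map (fun p => (p.1, p.2.map PySem.Dict.items))

-- ===== PORT B =====
-- the while loop 'while pending: peel the first group, append it to out if it has company'
def pvRuns : List (String × PySem.Dict String String) → List (String × List (PySem.Dict String String)) → List (String × List (PySem.Dict String String))
  | [], out => out
  | (m, v) :: rest, out =>
    let same := (rest.filter (fun p => p.1 == m)).map Prod.snd
    pvRuns (rest.filter (fun p => p.1 != m))
      (if same.isEmpty then out else out ++ [(m, v :: same)])
termination_by pending _ => pending.length
decreasing_by simpa using Nat.lt_succ_of_le ((List.length_filter_le _ _).trans (by simp))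

def filter_by_md5sum_alt (files : List (String × List (String × String))) : List (String × List (List (String × String))) :=
  -- survivors = []; for key, value in files.items(): m = value["md5sum"]; if "md5sum" not in m: ...
  let survivors : List (String × PySem.Dict String String) :=
    files.foldl (fun acc kv =>
      let value : PySem.Dict String String := PySem.Dict.mk kv.2
      match value.get? "md5sum" with
      | none => acc  -- value["md5sum"] would raise KeyError: such inputs are outside Pre_
      | some m =>
        if !(PySem.Str.isIn "md5sum" m) then acc ++ [(m, value.insert "path" kv.1)]
        else acc) []
  let out := pvRuns survivors []
  -- return dict(out)  (keys of out are distinct by construction)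
  let d : PySem.Dict String (List (PySem.Dict String String)) :=
    out.foldl (fun d p => d.insert p.1 p.2) PySem.Dict.empty
  d.items.map (fun p => (p.1, p.2.map PySem.Dict.items))

-- ===== PRECONDITION & SPEC =====
-- Pre_ excludes value dicts lacking a "md5sum" key (Python raises KeyError there, in both A and B) and
-- duplicate keys in the outer dict or inside a value dict (a Python dict cannot hold them, so the
-- assoc-list model's behaviour there is accidental).
def Pre_filter_by_md5sum (files : List (String × List (String × String))) : Prop :=
  (files.map Prod.fst).Nodup ∧
  ∀ p ∈ files, (p.2.map Prod.fst).Nodup ∧ "md5sum" ∈ p.2.map Prod.fst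
instance (files : List (String × List (String × String))) : Decidable (Pre_filter_by_md5sum files) := by
  unfold Pre_filter_by_md5sum; infer_instance

def pvWitness_filter_by_md5sum : (List (String × List (String × String))) :=
  [("f1", [("md5sum", "x")]), ("f2", [("md5sum", "x")]), ("f3", [("md5sum", "y")])]

def Spec_filter_by_md5sum (files : List (String × List (String × String))) (out : List (String × List (List (String × String)))) : Prop := out = filter_by_md5sum_alt files
instance (files : List (String × List (String × String))) (out : List (String × List (List (String × String)))) : Decidable (Spec_filter_by_md5sum files out) := by unfold Spec_filter_by_md5sum; infer_instance

-- ===== CLAIM (what is proved, stated in full; the proofs are below) =====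
def Claim_equal_filter_by_md5sum : Prop := ∀ (files : List (String × List (String × String))), Dom_filter_by_md5sum files → Pre_filter_by_md5sum files → Spec_filter_by_md5sum files (filter_by_md5sum files)

-- ===== LEMMAS AND PROOFS =====

def pvPick (kv : String × List (String × String)) : Option (String × PySem.Dict String String) :=
  let value : PySem.Dict String String := PySem.Dict.mk kv.2
  match value.get? "md5sum" with
  | none => none
  | some m => if PySem.Str.isIn "md5sum" m then none else some (m, value.insert "path" kv.1)

def pvGroup (l : List (String × PySem.Dict String String))
    (d : PySem.Dict String (List (PySem.Dict String String))) :
    PySem.Dict String (List (PySem.Dict String String)) :=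
  l.foldl (fun d p => d.modify p.1 [] (· ++ [p.2])) d

-- the common "grouped and filtered" normal form both ports are reduced to
def pvDubs (s : List (String × PySem.Dict String String)) :
    List (String × List (PySem.Dict String String)) :=
  ((PySem.Set.ofList (s.map Prod.fst)).map
    (fun k => (k, (s.filter (fun p => p.1 == k)).map Prod.snd))).filter
      (fun p => decide (p.2.length > 1))

theorem pvAstep_eq_modify (d : PySem.Dict String (List (PySem.Dict String String)))
    (m : String) (v : PySem.Dict String String) :
    (match d.get? m with
     | some l => d.insert m (l ++ [v])
     | none   => d.insert m [v]) = d.modify m [] (· ++ [v]) := by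
  cases h : d.get? m with
  | none => simp [PySem.Dict.modify, PySem.Dict.getD_eq_get?_getD, h]
  | some l => simp [PySem.Dict.modify, PySem.Dict.getD_eq_get?_getD, h]

theorem pvA_loop_eq (files : List (String × List (String × String)))
    (d : PySem.Dict String (List (PySem.Dict String String))) :
    files.foldl (fun counter kv =>
      let value : PySem.Dict String String := PySem.Dict.mk kv.2
      match value.get? "md5sum" with
      | none => counter
      | some m =>
        if PySem.Str.isIn "md5sum" m then counter
        else
          match counter.get? m with
          | some l => counter.insert m (l ++ [value.insert "path" kv.1])
          | none   => counter.insert m [value.insert "path" kv.1]) d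
    = pvGroup (files.filterMap pvPick) d := by
  induction files generalizing d with
  | nil => rfl
  | cons kv rest ih =>
    simp only [List.foldl_cons, List.filterMap_cons]
    cases h : (PySem.Dict.mk kv.2 : PySem.Dict String String).get? "md5sum" with
    | none => simp only [pvPick, h]; exact ih d
    | some m =>
      by_cases hin : PySem.Str.isIn "md5sum" m
      · simp only [pvPick, h, hin, if_pos]; exact ih d
      · simp only [pvPick, h, if_neg hin]
        rw [pvAstep_eq_modify]
        simp only [pvGroup, List.foldl_cons]
        exact ih _

theorem pvB_loop_eq (files : List (String × List (String × String)))
    (acc : List (String × PySem.Dict String String)) :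
    files.foldl (fun acc kv =>
      let value : PySem.Dict String String := PySem.Dict.mk kv.2
      match value.get? "md5sum" with
      | none => acc
      | some m =>
        if !(PySem.Str.isIn "md5sum" m) then acc ++ [(m, value.insert "path" kv.1)]
        else acc) acc
    = acc ++ files.filterMap pvPick := by
  induction files generalizing acc with
  | nil => simp
  | cons kv rest ih =>
    simp only [List.foldl_cons, List.filterMap_cons]
    cases h : (PySem.Dict.mk kv.2 : PySem.Dict String String).get? "md5sum" with
    | none => simp only [pvPick, h]; exact ih acc
    | some m =>
      by_cases hin : PySem.Str.isIn "md5sum" m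
      · simp only [pvPick, h, hin, ite_true]
        rw [if_neg (by simp [PySem.Str.isIn] at hin; simp)]
        exact ih acc
      · simp only [pvPick, h, if_neg hin]
        rw [if_pos (by simp only [Bool.not_eq_true] at hin; simp [PySem.Str.isIn] at hin; simp [PySem.Str.isIn, hin])]
        rw [ih]; simp only [List.append_assoc, List.singleton_append]; rfl

theorem pvCond_insert (cond : String × List (PySem.Dict String String) → Prop)
    [DecidablePred cond]
    (l : List (String × List (PySem.Dict String String)))
    (d : PySem.Dict String (List (PySem.Dict String String)))
    (hfresh : ∀ p ∈ l, d.contains p.1 = false) (hnd : (l.map Prod.fst).Nodup) :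
    (l.foldl (fun d p => if cond p then d.insert p.1 p.2 else d) d).items
    = d.items ++ l.filter (fun p => decide (cond p)) := by
  induction l generalizing d with
  | nil => simp
  | cons p rest ih =>
    simp only [List.map_cons, List.nodup_cons] at hnd
    by_cases hc : cond p
    · rw [List.foldl_cons, if_pos hc, List.filter_cons_of_pos (by simpa using hc)]
      rw [ih _ ?_ hnd.2]
      · rw [PySem.Dict.items_insert_of_not_contains _ _ (hfresh p (by simp))]
        simp
      · intro q hq
        rw [PySem.Dict.contains_insert]
        have : q.1 ≠ p.1 := by
          intro he; exact hnd.1 (he ▸ List.mem_map_of_mem hq)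
        simp [this, hfresh q (List.mem_cons_of_mem _ hq)]
    · rw [List.foldl_cons, if_neg hc, List.filter_cons_of_neg (by simpa using hc)]
      exact ih _ (fun q hq => hfresh q (List.mem_cons_of_mem _ hq)) hnd.2

theorem pvFoldInsert_items
    (l : List (String × List (PySem.Dict String String)))
    (d : PySem.Dict String (List (PySem.Dict String String)))
    (hfresh : ∀ p ∈ l, d.contains p.1 = false) (hnd : (l.map Prod.fst).Nodup) :
    (l.foldl (fun d p => d.insert p.1 p.2) d).items = d.items ++ l := by
  have h := pvCond_insert (fun _ => True) l d hfresh hnd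
  simpa using h

theorem pvAdd_eq (s : PySem.Set String) (x : String) :
    PySem.Set.add s x = if x ∈ s then s else s ++ [x] := by
  show (if PySem.Set.contains s x then s else s ++ [x]) = _
  by_cases hx : x ∈ s
  · rw [if_pos ((PySem.Set.contains_iff s x).mpr hx), if_pos hx]
  · rw [if_neg (fun hc => hx ((PySem.Set.contains_iff s x).mp hc)), if_neg hx]

theorem pvFoldAdd_filter (l : List String) (s : PySem.Set String) (m : String) (hm : m ∈ s) :
    l.foldl PySem.Set.add s = (l.filter (fun x => x != m)).foldl PySem.Set.add s := by
  induction l generalizing s with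
  | nil => rfl
  | cons x rest ih =>
    by_cases hx : x = m
    · subst hx
      rw [List.filter_cons_of_neg (by simp), List.foldl_cons, pvAdd_eq, if_pos hm]
      exact ih s hm
    · rw [List.filter_cons_of_pos (by simpa using hx), List.foldl_cons, List.foldl_cons]
      refine ih _ ?_
      rw [pvAdd_eq]; split_ifs <;> simp [hm]

theorem pvFoldAdd_cons (l : List String) (s : PySem.Set String) (m : String) (hm : m ∉ l) :
    l.foldl PySem.Set.add (m :: s) = m :: l.foldl PySem.Set.add s := by
  induction l generalizing s with
  | nil => rfl
  | cons x rest ih =>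
    have hxm : x ≠ m := fun h => hm (h ▸ List.mem_cons_self ..)
    rw [List.foldl_cons, List.foldl_cons, pvAdd_eq, pvAdd_eq]
    have : (x ∈ m :: s) ↔ x ∈ s := by simp [hxm]
    rw [show (if x ∈ m :: s then m :: s else (m :: s) ++ [x])
        = m :: (if x ∈ s then s else s ++ [x]) by split_ifs with h1 h2 <;> simp_all]
    exact ih _ (fun h => hm (List.mem_cons_of_mem _ h))

theorem pvOfList_cons (m : String) (l : List String) :
    PySem.Set.ofList (m :: l) = m :: PySem.Set.ofList (l.filter (fun x => x != m)) := by
  rw [PySem.Set.ofList_eq_foldl, PySem.Set.ofList_eq_foldl, List.foldl_cons]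
  rw [show PySem.Set.add [] m = [m] from rfl]
  rw [pvFoldAdd_filter l [m] m (by simp)]
  exact pvFoldAdd_cons _ [] m (by simp)

-- the repeated-partition loop computes the grouped-and-filtered normal form
theorem pvRuns_eq (s : List (String × PySem.Dict String String))
    (out : List (String × List (PySem.Dict String String))) :
    pvRuns s out = out ++ pvDubs s := by
  induction hn : s.length using Nat.strong_induction_on generalizing s out with
  | _ n ih =>
  match s with
  | [] =>
    simp only [pvRuns]
    simp [pvDubs, PySem.Set.ofList_eq_foldl]
  | (m, v) :: rest =>
    subst hn
    simp only [pvRuns]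
    have hlt : (rest.filter (fun p => p.1 != m)).length < ((m, v) :: rest).length :=
      Nat.lt_succ_of_le (List.length_filter_le _ _)
    rw [ih _ hlt _ _ rfl]
    have hkeys : (rest.filter (fun p => p.1 != m)).map Prod.fst
        = (rest.map Prod.fst).filter (fun x => x != m) := by
      rw [List.filter_map]; rfl
    have hhead : (((m, v) :: rest).filter (fun p => p.1 == m)).map Prod.snd
        = v :: (rest.filter (fun p => p.1 == m)).map Prod.snd := by
      rw [List.filter_cons_of_pos (by simp)]; rfl
    have hbuckets : ∀ k, k ≠ m →
        ((m, v) :: rest).filter (fun p => p.1 == k)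
          = (rest.filter (fun p => p.1 != m)).filter (fun p => p.1 == k) := by
      intro k hk
      rw [List.filter_cons_of_neg (by simpa using fun h => hk h.symm), List.filter_filter]
      refine (List.filter_congr ?_).symm
      intro p _
      by_cases hp : p.1 = k
      · simp [hp, hk]
      · simp [hp]
    have hmap : ∀ k ∈ PySem.Set.ofList ((rest.filter (fun p => p.1 != m)).map Prod.fst),
        ((fun k => ((k, ((((m, v) :: rest).filter (fun p => p.1 == k)).map Prod.snd)) :
            String × List (PySem.Dict String String))) k)
          = (k, ((rest.filter (fun p => p.1 != m)).filter (fun p => p.1 == k)).map Prod.snd) := by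
      intro k hk
      have hkm : k ≠ m := by
        have hmem := (PySem.Set.mem_ofList _ _).mp hk
        rw [hkeys] at hmem
        simpa using (List.mem_filter.mp hmem).2
      simp only [hbuckets k hkm]
    conv_rhs => rw [pvDubs, List.map_cons, pvOfList_cons, ← hkeys, List.map_cons,
      List.map_congr_left hmap]
    by_cases hs : ((rest.filter (fun p => p.1 == m)).map Prod.snd).isEmpty
    · have h0 : (rest.filter (fun p => p.1 == m)).map Prod.snd = [] := by
        simpa [List.isEmpty_iff] using hs
      rw [if_pos hs, List.filter_cons_of_neg (by simp [h0])]
      rfl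
    · have h1 : 0 < ((rest.filter (fun p => p.1 == m)).map Prod.snd).length := by
        simp only [List.isEmpty_iff] at hs
        exact List.length_pos_of_ne_nil hs
      rw [if_neg (by simpa using hs), List.filter_cons_of_pos (by
        rw [decide_eq_true_eq]
        show 1 < ((((m, v) :: rest).filter (fun p => p.1 == m)).map Prod.snd).length
        rw [hhead]
        simpa using h1)]
      rw [hhead, List.append_assoc]
      rfl

-- characterisation of pvGroup's dict
theorem pvGroup_keys (s : List (String × PySem.Dict String String)) :
    (pvGroup s PySem.Dict.empty).keys = PySem.Set.ofList (s.map Prod.fst) := by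
  unfold pvGroup
  rw [PySem.Dict.keys_foldl_modify_key s Prod.fst [] (fun _ p => (· ++ [p.2]))]
  rw [PySem.Dict.keys_empty]
  exact PySem.Set.update_empty _

theorem pvGroup_getD (s : List (String × PySem.Dict String String)) (k : String) :
    (pvGroup s PySem.Dict.empty).getD k []
      = (s.filter (fun p => p.1 == k)).map Prod.snd := by
  unfold pvGroup
  rw [PySem.Dict.getD_foldl_modify_append]
  simp [PySem.Dict.getD_empty]

theorem pvGroup_items (s : List (String × PySem.Dict String String)) :
    (pvGroup s PySem.Dict.empty).items
      = (PySem.Set.ofList (s.map Prod.fst)).map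
          (fun k => (k, (s.filter (fun p => p.1 == k)).map Prod.snd)) := by
  rw [PySem.Dict.items_eq_map_keys _ (by rw [pvGroup_keys]; exact PySem.Set.nodup_ofList _) []]
  rw [pvGroup_keys]
  exact List.map_congr_left (fun k _ => by rw [pvGroup_getD])

theorem pvDubs_keys_nodup (s : List (String × PySem.Dict String String)) :
    ((pvDubs s).map Prod.fst).Nodup := by
  unfold pvDubs
  rw [List.filter_map, List.map_map]
  have : (Prod.fst ∘ fun k => ((k, (s.filter (fun p => p.1 == k)).map Prod.snd) :
      String × List (PySem.Dict String String))) = id := rfl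
  rw [this, List.map_id]
  exact (PySem.Set.nodup_ofList _).filter _

theorem filter_by_md5sum_eq (files : List (String × List (String × String))) :
    filter_by_md5sum files = filter_by_md5sum_alt files := by
  unfold filter_by_md5sum filter_by_md5sum_alt
  rw [pvA_loop_eq, pvB_loop_eq]
  simp only [List.nil_append]
  set s : List (String × PySem.Dict String String) := files.filterMap pvPick with hs
  -- A's second loop: filter the grouped items by bucket length
  have hA : ((pvGroup s PySem.Dict.empty).items.foldl
      (fun dubs p => if p.2.length > 1 then dubs.insert p.1 p.2 else dubs)
      PySem.Dict.empty).items = pvDubs s := by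
    rw [pvCond_insert _ _ _ (fun p _ => PySem.Dict.contains_empty _) ?_]
    · rw [pvGroup_items]; unfold pvDubs; rfl
    · have h := PySem.Set.nodup_ofList (s.map Prod.fst)
      rw [← pvGroup_keys] at h
      exact h
  -- B's dict(out): the fold of inserts just lists out back
  have hB : ((pvRuns s []).foldl (fun d p => d.insert p.1 p.2) PySem.Dict.empty).items
      = pvDubs s := by
    rw [pvRuns_eq s [], List.nil_append]
    rw [pvFoldInsert_items _ _ (fun p _ => PySem.Dict.contains_empty _) (pvDubs_keys_nodup s)]
    rfl
  rw [hA, hB]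

-- ===== VERDICT (by name: the statement is the Claim_ definition above) =====
theorem filter_by_md5sum_spec : Claim_equal_filter_by_md5sum := by
  intro files _ _
  unfold Spec_filter_by_md5sum
  exact filter_by_md5sum_eq files
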